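-- pv_equiv track=rewrite | github.com/jaideepgadekar/Naive-bayes-from-scratch | train.py | class_wise_words_frequency_dict
-- ===== SOURCE A (Python) =====
-- def class_wise_words_frequency_dict(X, Y):
--     #TODO Complete the function implementation. Read the Question text for details
--     classes = {}
--     for i in range(len(X)):
--         for j in set(Y):
--             if Y[i] == int(j):
--                 if j not in classes:
--                     classes[j] = {}
--                     for word in X[i].split():
--                         if word in classes[j]:
--                             classes[j][word] += 1
--                         else:
--                             classes[j][word] = 1
--                 else:
--                     for word in X[i].split():
--                         if word in classes[j]:
--                             classes[j][word] += 1
--                         else: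
--                             classes[j][word] = 1
--     return classes
-- ===== SOURCE B (Python) =====
-- def class_wise_words_frequency_dict(X, Y):
--     classes = {}
--     for doc, y in zip(X, Y):
--         freq = classes.get(y, {})
--         for w in doc.split():
--             freq[w] = freq.get(w, 0) + 1
--         classes[y] = freq
--     return classes
-- ===== Notes on version B (the rewrite author's own statement) =====
-- stated objective: faster
-- what changed: B makes one pass over zip(X, Y) and updates the counter dict of class Y[i] directly, instead of A's inner scan over set(Y) for every document (and A's duplicated word-count branch); asymptotically O(total words) vs O(n*classes + total words).
import Mathlib
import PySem

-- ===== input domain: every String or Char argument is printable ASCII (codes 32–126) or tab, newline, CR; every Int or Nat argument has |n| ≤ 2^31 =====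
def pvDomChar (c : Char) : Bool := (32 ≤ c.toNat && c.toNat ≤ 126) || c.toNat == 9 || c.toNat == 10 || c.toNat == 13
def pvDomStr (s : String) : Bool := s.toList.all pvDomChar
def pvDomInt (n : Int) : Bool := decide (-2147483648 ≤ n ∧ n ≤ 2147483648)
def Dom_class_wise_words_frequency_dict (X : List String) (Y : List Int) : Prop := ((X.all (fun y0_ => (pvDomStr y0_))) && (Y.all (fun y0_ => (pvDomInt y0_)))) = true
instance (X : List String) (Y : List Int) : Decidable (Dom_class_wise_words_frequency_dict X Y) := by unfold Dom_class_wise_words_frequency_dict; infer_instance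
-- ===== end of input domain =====

-- B replaces A's per-document scan over set(Y) (with a duplicated word-count branch) by one pass
-- over zip(X, Y) indexing the class dict directly by Y[i]; faster in a timing run (asymptotic).


-- ===== PORT A =====
-- 'if word in classes[j]: classes[j][word] += 1 else: classes[j][word] = 1', acting on the inner dict
def pvAddWordA (d : PySem.Dict String Int) (w : String) : PySem.Dict String Int :=
  if (d.get? w).isSome then d.insert w (d.getD w 0 + 1) else d.insert w 1

-- Literal port of A. Y[i] is PySem.List.pyGetD Y i 0: inside Pre_ the index is in range (or the
-- set(Y) loop is empty), exactly where Python's Y[i] returns; int(j) on the int j is j itself.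
def class_wise_words_frequency_dict (X : List String) (Y : List Int) : List (Int × List (String × Int)) :=
  (((PySem.List.pyRange 0 (X.length : Int) 1).foldl (fun classes i =>
      (PySem.Set.ofList Y).foldl (fun classes j =>
        if PySem.List.pyGetD Y i 0 == j then
          if !(classes.contains j) then
            -- 'classes[j] = {}', then the word loop on classes[j]
            (PySem.Str.split₀ (PySem.List.pyGetD X i "")).foldl
              (fun c w => c.modify j PySem.Dict.empty (fun d => pvAddWordA d w))
              (classes.insert j PySem.Dict.empty)
          else
            (PySem.Str.split₀ (PySem.List.pyGetD X i "")).foldl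
              (fun c w => c.modify j PySem.Dict.empty (fun d => pvAddWordA d w)) classes
        else classes) classes)
    (PySem.Dict.empty : PySem.Dict Int (PySem.Dict String Int))).items).map (fun p => (p.1, p.2.items))

-- ===== PORT B =====
-- 'freq[w] = freq.get(w, 0) + 1'
def pvBump (d : PySem.Dict String Int) (w : String) : PySem.Dict String Int :=
  d.insert w (d.getD w 0 + 1)

-- Literal port of B: one fold over zip(X, Y); 'classes[y] = freq' is the final insert.
def class_wise_words_frequency_dict_alt (X : List String) (Y : List Int) : List (Int × List (String × Int)) :=
  (((X.zip Y).foldl (fun classes p =>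
      classes.insert p.2 ((PySem.Str.split₀ p.1).foldl pvBump (classes.getD p.2 PySem.Dict.empty)))
    (PySem.Dict.empty : PySem.Dict Int (PySem.Dict String Int))).items).map (fun p => (p.1, p.2.items))

-- ===== PRECONDITION & SPEC =====
-- A raises IndexError on Y[i] when len(X) > len(Y) and Y is non-empty (with Y = [] the inner loop
-- over set(Y) never runs, so A returns); Pre_ is exactly the inputs where A returns normally.
def Pre_class_wise_words_frequency_dict (X : List String) (Y : List Int) : Prop :=
  Y = [] ∨ X.length ≤ Y.length
instance (X : List String) (Y : List Int) : Decidable (Pre_class_wise_words_frequency_dict X Y) := by unfold Pre_class_wise_words_frequency_dict; infer_instance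
def pvWitness_class_wise_words_frequency_dict : List String × List Int := (["a b a", "b"], [1, 0])

def Spec_class_wise_words_frequency_dict (X : List String) (Y : List Int) (out : List (Int × List (String × Int))) : Prop := out = class_wise_words_frequency_dict_alt X Y
instance (X : List String) (Y : List Int) (out : List (Int × List (String × Int))) : Decidable (Spec_class_wise_words_frequency_dict X Y out) := by unfold Spec_class_wise_words_frequency_dict; infer_instance

-- ===== CLAIM (what is proved, stated in full; the proofs are below) =====
def Claim_equal_class_wise_words_frequency_dict : Prop := ∀ (X : List String) (Y : List Int), Dom_class_wise_words_frequency_dict X Y → Pre_class_wise_words_frequency_dict X Y → Spec_class_wise_words_frequency_dict X Y (class_wise_words_frequency_dict X Y)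

-- ===== LEMMAS AND PROOFS =====

-- pvAddWordA is pvBump: in the 'else' branch d.get? w = none, so d.getD w 0 = 0.
theorem pvAddWordA_eq_pvBump (d : PySem.Dict String Int) (w : String) :
    pvAddWordA d w = pvBump d w := by
  unfold pvAddWordA pvBump
  split_ifs with h
  · rfl
  · rw [PySem.Dict.getD_of_get?_eq_none _ _ (Option.not_isSome_iff_eq_none.mp h), zero_add]

-- Re-inserting a key with its stored value is the identity (keys unique).
theorem insert_getD_self (d : PySem.Dict Int (PySem.Dict String Int)) (k : Int)
    (hc : d.contains k = true) (hnd : d.keys.Nodup) :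
    d.insert k (d.getD k PySem.Dict.empty) = d := by
  apply PySem.Dict.ext
  rw [PySem.Dict.items_insert_of_contains d _ hc]
  refine (List.map_congr_left ?_).trans (List.map_id _)
  rintro ⟨a, b⟩ hp
  by_cases hk : a = k
  · subst hk
    have hg : d.get? a = some b := (PySem.Dict.get?_eq_some_iff_mem_items d a b hnd).mpr hp
    simp [PySem.Dict.getD_of_get?_eq_some d _ hg]
  · simp [hk]

-- A's word loop over an already-present class key is a single insert of the bumped counter.
theorem foldWords_eq_insert (ws : List String) :
    ∀ (c : PySem.Dict Int (PySem.Dict String Int)) (j : Int),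
      c.contains j = true → c.keys.Nodup →
      ws.foldl (fun c w => c.modify j PySem.Dict.empty (fun d => pvAddWordA d w)) c
        = c.insert j (ws.foldl pvBump (c.getD j PySem.Dict.empty)) := by
  induction ws with
  | nil => intro c j hc hnd; exact (insert_getD_self c j hc hnd).symm
  | cons w ws ih =>
    intro c j hc hnd
    have hstep : c.modify j PySem.Dict.empty (fun d => pvAddWordA d w)
        = c.insert j (pvBump (c.getD j PySem.Dict.empty) w) := by
      simp [PySem.Dict.modify, pvAddWordA_eq_pvBump]
    simp only [List.foldl_cons]
    rw [hstep]
    rw [ih _ j (PySem.Dict.contains_insert_self _ _ _) (PySem.Dict.nodup_keys_insert _ _ _ hnd)]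
    rw [PySem.Dict.getD_insert_self, PySem.Dict.insert_insert_self]

-- Folding a guarded update over a duplicate-free list containing y applies the update once, at y.
theorem foldl_guard_nodup {β : Type} (g : β → Int → β) (y : Int) :
    ∀ (js : List Int) (c : β), js.Nodup → y ∈ js →
      js.foldl (fun c j => if y == j then g c j else c) c = g c y := by
  intro js
  induction js with
  | nil => intro c _ h; cases h
  | cons j js ih =>
    intro c hnd hmem
    simp only [List.foldl_cons]
    rcases List.mem_cons.mp hmem with h | h
    · subst h
      simp only [beq_self_eq_true, if_true]
      have hnot : y ∉ js := (List.nodup_cons.mp hnd).1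
      clear ih hnd hmem
      induction js with
      | nil => rfl
      | cons j' js' ih' =>
        have hne : y ≠ j' := fun he => hnot (he ▸ List.mem_cons_self)
        rw [List.foldl_cons, if_neg (by simp [hne])]
        exact ih' (fun hm => hnot (List.mem_cons_of_mem _ hm))
    · have hne : y ≠ j := fun he => (List.nodup_cons.mp hnd).1 (he ▸ h)
      rw [if_neg (by simp [hne])]
      exact ih c (List.nodup_cons.mp hnd).2 h

-- A's whole inner loop body for document (x, y) equals B's step.
theorem innerA_eq_stepB (Y : List Int) (x : String) (y : Int)
    (c : PySem.Dict Int (PySem.Dict String Int)) (hy : y ∈ Y) (hnd : c.keys.Nodup) :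
    (PySem.Set.ofList Y).foldl (fun c j =>
        if y == j then
          if !(c.contains j) then
            (PySem.Str.split₀ x).foldl
              (fun c w => c.modify j PySem.Dict.empty (fun d => pvAddWordA d w)) (c.insert j PySem.Dict.empty)
          else
            (PySem.Str.split₀ x).foldl
              (fun c w => c.modify j PySem.Dict.empty (fun d => pvAddWordA d w)) c
        else c) c
      = c.insert y ((PySem.Str.split₀ x).foldl pvBump (c.getD y PySem.Dict.empty)) := by
  rw [foldl_guard_nodup _ y (PySem.Set.ofList Y) c (PySem.Set.nodup_ofList Y)
        ((PySem.Set.mem_ofList Y y).mpr hy)]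
  by_cases hc : c.contains y = true
  · have hb : (!c.contains y) = false := by rw [hc]; rfl
    rw [hb, if_neg (by simp)]
    exact foldWords_eq_insert _ c y hc hnd
  · have hc' : c.contains y = false := by simpa using hc
    have hb : (!c.contains y) = true := by rw [hc']; rfl
    rw [hb, if_pos rfl]
    rw [foldWords_eq_insert _ (c.insert y PySem.Dict.empty) y
          (PySem.Dict.contains_insert_self _ _ _) (PySem.Dict.nodup_keys_insert _ _ _ hnd)]
    rw [PySem.Dict.getD_insert_self, PySem.Dict.insert_insert_self,
        PySem.Dict.getD_of_not_contains _ _ hc']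

-- The zipped main loops of A and B agree (A's step rewritten per innerA_eq_stepB).
theorem mainloop_eq (Y : List Int) :
    ∀ (L : List (String × Int)) (c : PySem.Dict Int (PySem.Dict String Int)),
      c.keys.Nodup → (∀ p ∈ L, p.2 ∈ Y) →
      L.foldl (fun c p =>
          (PySem.Set.ofList Y).foldl (fun c j =>
            if p.2 == j then
              if !(c.contains j) then
                (PySem.Str.split₀ p.1).foldl
                  (fun c w => c.modify j PySem.Dict.empty (fun d => pvAddWordA d w)) (c.insert j PySem.Dict.empty)
              else
                (PySem.Str.split₀ p.1).foldl
                  (fun c w => c.modify j PySem.Dict.empty (fun d => pvAddWordA d w)) c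
            else c) c) c
        = L.foldl (fun c p =>
            c.insert p.2 ((PySem.Str.split₀ p.1).foldl pvBump (c.getD p.2 PySem.Dict.empty))) c := by
  intro L
  induction L with
  | nil => intro c _ _; rfl
  | cons p L ih =>
    intro c hnd hmem
    simp only [List.foldl_cons]
    rw [innerA_eq_stepB Y p.1 p.2 c (hmem p List.mem_cons_self) hnd]
    exact ih _ (PySem.Dict.nodup_keys_insert _ _ _ hnd)
      (fun q hq => hmem q (List.mem_cons_of_mem _ hq))

-- A's range(len(X)) loop, with in-range indexing, is the fold over zip X Y.
theorem range_loop_eq_zip {β : Type} (f : β → String → Int → β) (X : List String) (Y : List Int)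
    (hlen : X.length ≤ Y.length) (c : β) :
    (PySem.List.pyRange 0 (X.length : Int) 1).foldl
        (fun c i => f c (PySem.List.pyGetD X i "") (PySem.List.pyGetD Y i 0)) c
      = (X.zip Y).foldl (fun c p => f c p.1 p.2) c := by
  rw [PySem.List.pyRange_zero_natCast, List.foldl_map]
  have hzip : X.zip Y = (List.range X.length).map (fun k => (X.getD k "", Y.getD k 0)) := by
    apply List.ext_getElem
    · simp [List.length_zip, Nat.min_eq_left hlen]
    · intro n h1 h2
      simp only [List.getElem_zip, List.getElem_map, List.getElem_range]
      have hx : n < X.length := by simpa [List.length_zip, Nat.min_eq_left hlen] using h1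
      rw [List.getD_eq_getElem X _ hx, List.getD_eq_getElem Y _ (lt_of_lt_of_le hx hlen)]
  rw [hzip, List.foldl_map]
  apply PySem.List.foldl_congr_mem
  intro acc k hk
  rw [PySem.List.pyGetD_natCast, PySem.List.pyGetD_natCast]

-- ===== VERDICT (by name: the statement is the Claim_ definition above) =====
theorem class_wise_words_frequency_dict_spec : Claim_equal_class_wise_words_frequency_dict := by
  intro X Y _ hpre
  unfold Spec_class_wise_words_frequency_dict
  unfold class_wise_words_frequency_dict class_wise_words_frequency_dict_alt
  rcases hpre with hY | hlen
  · subst hY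
    simp [PySem.Set.ofList, List.zip_nil_right]
  · congr 2
    rw [range_loop_eq_zip (fun (c : PySem.Dict Int (PySem.Dict String Int)) (x : String) (y : Int) =>
          (PySem.Set.ofList Y).foldl (fun c j =>
            if y == j then
              if !(c.contains j) then
                (PySem.Str.split₀ x).foldl
                  (fun c w => c.modify j PySem.Dict.empty (fun d => pvAddWordA d w)) (c.insert j PySem.Dict.empty)
              else
                (PySem.Str.split₀ x).foldl
                  (fun c w => c.modify j PySem.Dict.empty (fun d => pvAddWordA d w)) c
            else c) c) X Y hlen]
    exact mainloop_eq Y (X.zip Y) PySem.Dict.empty (by simp [PySem.Dict.keys_empty])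
      (fun p hp => List.of_mem_zip hp |>.2)
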